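-- pv_equiv track=rewrite | github.com/SwashyDashy2/stage_joris | IDMT_Class_Writer.py | categorize_vehicle
-- ===== SOURCE A (Python) =====
-- def categorize_vehicle(filename):
--     # Car
--     if "_CR_" in filename or "_CL_" in filename:
--         return 0
--     # Bus or Truck
--     elif any(x in filename for x in ["_BR_", "_BL_", "_TR_", "_TL_"]):
--         return 1
--     # Motorcycle
--     elif "_MR_" in filename or "_ML_" in filename:
--         return 2
--     # No match
--     else:
--         return None
-- ===== SOURCE B (Python) =====
-- _TOKENS = {"_CR_": 0, "_CL_": 0,
--            "_BR_": 1, "_BL_": 1, "_TR_": 1, "_TL_": 1,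
--            "_MR_": 2, "_ML_": 2}
--
-- def categorize_vehicle(filename):
--     matches = [code for tok, code in _TOKENS.items() if tok in filename]
--     return min(matches) if matches else None
-- ===== Notes on version B (the rewrite author's own statement) =====
-- stated objective: simpler
-- what changed: Replaces the ordered short-circuit if/elif chain with a token-to-code table: collect the codes of all matching tokens and return their minimum (lower code = higher priority), None if no token matches.
import Mathlib
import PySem

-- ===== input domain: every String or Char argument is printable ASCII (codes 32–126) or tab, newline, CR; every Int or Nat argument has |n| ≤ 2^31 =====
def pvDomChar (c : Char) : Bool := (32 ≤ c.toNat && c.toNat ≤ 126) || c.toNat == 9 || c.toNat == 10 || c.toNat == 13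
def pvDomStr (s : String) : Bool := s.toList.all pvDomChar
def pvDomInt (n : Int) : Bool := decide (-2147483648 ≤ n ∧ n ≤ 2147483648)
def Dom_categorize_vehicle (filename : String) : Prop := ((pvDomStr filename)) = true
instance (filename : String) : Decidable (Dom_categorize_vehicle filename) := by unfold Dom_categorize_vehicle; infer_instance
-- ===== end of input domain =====

-- B replaces A's ordered short-circuit if/elif chain by a token→code table whose
-- matching codes are reduced by minimum (objective: simpler).

-- ===== PORT A =====
def categorize_vehicle (filename : String) : Option Int :=
  if PySem.Str.isIn "_CR_" filename || PySem.Str.isIn "_CL_" filename then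
    some 0
  else if ["_BR_", "_BL_", "_TR_", "_TL_"].any (fun x => PySem.Str.isIn x filename) then
    some 1
  else if PySem.Str.isIn "_MR_" filename || PySem.Str.isIn "_ML_" filename then
    some 2
  else
    none

-- ===== PORT B =====
def vehicleTokens : List (String × Int) :=
  [("_CR_", 0), ("_CL_", 0),
   ("_BR_", 1), ("_BL_", 1), ("_TR_", 1), ("_TL_", 1),
   ("_MR_", 2), ("_ML_", 2)]

def categorize_vehicle_alt (filename : String) : Option Int :=
  let hits :=
    (vehicleTokens.filter (fun p => PySem.Str.isIn p.1 filename)).map (fun p => p.2)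
  if hits ≠ [] then PySem.List.min? hits (fun x => x) else none

-- ===== PRECONDITION & SPEC =====
def Spec_categorize_vehicle (filename : String) (out : Option Int) : Prop := out = categorize_vehicle_alt filename
instance (filename : String) (out : Option Int) : Decidable (Spec_categorize_vehicle filename out) := by unfold Spec_categorize_vehicle; infer_instance

-- ===== CLAIM (what is proved, stated in full; the proofs are below) =====
def Claim_equal_categorize_vehicle : Prop := ∀ (filename : String), Dom_categorize_vehicle filename → Spec_categorize_vehicle filename (categorize_vehicle filename)

-- ===== LEMMAS AND PROOFS =====

-- ===== VERDICT (by name: the statement is the Claim_ definition above) =====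
theorem categorize_vehicle_spec : Claim_equal_categorize_vehicle := by
  intro f _
  show categorize_vehicle f = categorize_vehicle_alt f
  cases h1 : PySem.Chars.isIn ['_', 'C', 'R', '_'] f.toList <;>
  cases h2 : PySem.Chars.isIn ['_', 'C', 'L', '_'] f.toList <;>
  cases h3 : PySem.Chars.isIn ['_', 'B', 'R', '_'] f.toList <;>
  cases h4 : PySem.Chars.isIn ['_', 'B', 'L', '_'] f.toList <;>
  cases h5 : PySem.Chars.isIn ['_', 'T', 'R', '_'] f.toList <;>
  cases h6 : PySem.Chars.isIn ['_', 'T', 'L', '_'] f.toList <;>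
  cases h7 : PySem.Chars.isIn ['_', 'M', 'R', '_'] f.toList <;>
  cases h8 : PySem.Chars.isIn ['_', 'M', 'L', '_'] f.toList <;>
    simp [categorize_vehicle, categorize_vehicle_alt, vehicleTokens,
      h1, h2, h3, h4, h5, h6, h7, h8, PySem.List.min?]
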